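-- pv_equiv track=rewrite | github.com/supritha-rendedla/gfg | Difficulty: Medium/Max Xor Subarray of size K/max-xor-subarray-of-size-k.py | maxSubarrayXOR
-- ===== SOURCE A (Python) =====
-- def maxSubarrayXOR(arr, k):
--     n = len(arr)
--
--     # Step 1: Compute XOR of first window
--     current_xor = 0
--     for i in range(k):
--         current_xor ^= arr[i]
--
--     max_xor = current_xor
--
--     # Step 2: Slide the window
--     for i in range(k, n):
--         current_xor ^= arr[i - k]  # Remove left element
--         current_xor ^= arr[i]      # Add new element
--
--         max_xor = max(max_xor, current_xor)
--
--     return max_xor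
-- ===== SOURCE B (Python) =====
-- def maxSubarrayXOR(arr, k):
--     # Prefix-XOR table: window xor [j-k, j) = prefix[j] ^ prefix[j-k]
--     prefix = [0]
--     for x in arr:
--         prefix.append(prefix[-1] ^ x)
--     return max(prefix[j] ^ prefix[j - k] for j in range(k, len(arr) + 1))
-- ===== Notes on version B (the rewrite author's own statement) =====
-- stated objective: alternative
-- what changed: A maintains a running window XOR by removing the left element and adding the new one while sliding; B builds a prefix-XOR table once and takes the max of prefix[j]^prefix[j-k] over all window ends.
import Mathlib
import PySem

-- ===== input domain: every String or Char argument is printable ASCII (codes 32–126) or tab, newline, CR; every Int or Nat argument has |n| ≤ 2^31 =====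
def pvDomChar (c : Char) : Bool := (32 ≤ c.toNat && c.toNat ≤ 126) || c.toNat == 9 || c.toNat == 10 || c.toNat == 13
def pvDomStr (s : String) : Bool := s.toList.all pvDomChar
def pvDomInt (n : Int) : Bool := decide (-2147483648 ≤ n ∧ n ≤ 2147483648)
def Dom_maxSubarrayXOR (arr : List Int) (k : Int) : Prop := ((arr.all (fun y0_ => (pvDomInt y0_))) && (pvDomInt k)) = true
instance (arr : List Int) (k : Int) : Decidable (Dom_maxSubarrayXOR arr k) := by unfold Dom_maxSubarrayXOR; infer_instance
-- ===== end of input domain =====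

-- B replaces A's sliding-window XOR maintenance by a prefix-XOR table and a max over window XORs
-- prefix[j] ^ prefix[j-k]; same O(n) cost, different decomposition ("alternative").

-- ===== PORT A =====
def maxSubarrayXOR (arr : List Int) (k : Int) : Int :=
  let n : Int := PySem.List.len arr
  let current_xor : Int :=
    (PySem.List.pyRange 0 k).foldl (fun c i => PySem.Int.bxor c (PySem.List.pyGetD arr i 0)) 0
  let st :=
    (PySem.List.pyRange k n).foldl
      (fun (p : Int × Int) i =>
        let c := PySem.Int.bxor (PySem.Int.bxor p.1 (PySem.List.pyGetD arr (i - k) 0))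
                                (PySem.List.pyGetD arr i 0)
        (c, max p.2 c))
      (current_xor, current_xor)
  st.2

-- ===== PORT B =====
def maxSubarrayXOR_alt (arr : List Int) (k : Int) : Int :=
  let pre := arr.foldl
      (fun acc x => acc ++ [PySem.Int.bxor (PySem.List.pyGetD acc (-1) 0) x]) [0]
  let ws := (PySem.List.pyRange k (PySem.List.len arr + 1)).map
      (fun j => PySem.Int.bxor (PySem.List.pyGetD pre j 0) (PySem.List.pyGetD pre (j - k) 0))
  (PySem.List.max? ws (fun y => y)).getD 0

-- ===== PRECONDITION & SPEC =====
-- Pre_ excludes exactly the inputs where Python A raises IndexError (k < 0 or k > len(arr)).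
def Pre_maxSubarrayXOR (arr : List Int) (k : Int) : Prop := 0 ≤ k ∧ k ≤ (arr.length : Int)
instance (arr : List Int) (k : Int) : Decidable (Pre_maxSubarrayXOR arr k) := by
  unfold Pre_maxSubarrayXOR; infer_instance

def pvWitness_maxSubarrayXOR : List Int × Int := ([3, 1, 2], 2)

def Spec_maxSubarrayXOR (arr : List Int) (k : Int) (out : Int) : Prop := out = maxSubarrayXOR_alt arr k
instance (arr : List Int) (k : Int) (out : Int) : Decidable (Spec_maxSubarrayXOR arr k out) := by
  unfold Spec_maxSubarrayXOR; infer_instance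

-- ===== CLAIM (what is proved, stated in full; the proofs are below) =====
def Claim_equal_maxSubarrayXOR : Prop := ∀ (arr : List Int) (k : Int), Dom_maxSubarrayXOR arr k → Pre_maxSubarrayXOR arr k → Spec_maxSubarrayXOR arr k (maxSubarrayXOR arr k)

-- ===== LEMMAS AND PROOFS =====

-- xor of the first m elements (value of B's prefix table at index m)
def pvPxor (arr : List Int) (m : Nat) : Int := (arr.take m).foldl PySem.Int.bxor 0

-- xor of the window of length k ending at position j
def pvWnd (arr : List Int) (k j : Int) : Int :=
  PySem.Int.bxor (pvPxor arr j.toNat) (pvPxor arr (j - k).toNat)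

theorem pv_bxor_eq_xor (a b : Int) : PySem.Int.bxor a b = Int.xor a b := by
  unfold PySem.Int.bxor Int.xor
  rcases a with a | a <;> rcases b with b | b <;> simp [Int.negSucc_eq] <;> omega

theorem pv_bxor_assoc (a b c : Int) :
    PySem.Int.bxor (PySem.Int.bxor a b) c = PySem.Int.bxor a (PySem.Int.bxor b c) := by
  simp only [pv_bxor_eq_xor]
  rcases a with a | a <;> rcases b with b | b <;> rcases c with c | c <;>
    simp [Int.xor, Nat.xor_assoc]

theorem pv_xor_shuffle (p q a b : Int) :
    PySem.Int.bxor (PySem.Int.bxor (PySem.Int.bxor p q) a) b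
      = PySem.Int.bxor (PySem.Int.bxor p b) (PySem.Int.bxor q a) := by
  rw [pv_bxor_assoc, pv_bxor_assoc, ← pv_bxor_assoc q a b,
      PySem.Int.bxor_comm (PySem.Int.bxor q a) b, ← pv_bxor_assoc]

theorem pvPxor_succ (arr : List Int) (m : Nat) (h : m < arr.length) :
    pvPxor arr (m + 1) = PySem.Int.bxor (pvPxor arr m) arr[m] := by
  unfold pvPxor
  have ht : arr.take (m + 1) = arr.take m ++ [arr[m]] := by
    rw [List.take_add_one, List.getElem?_eq_getElem h]
    rfl
  rw [ht, List.foldl_append]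
  rfl

theorem pv_prefix_build (arr : List Int) :
    arr.foldl (fun acc x => acc ++ [PySem.Int.bxor (PySem.List.pyGetD acc (-1) 0) x]) [0]
      = (List.range (arr.length + 1)).map (pvPxor arr) := by
  induction arr using List.reverseRecOn with
  | nil => simp [pvPxor]
  | append_singleton ys x ih =>
    rw [List.foldl_append]
    simp only [List.foldl_cons, List.foldl_nil]
    rw [ih]
    have hlast : (List.range (ys.length + 1)).map (pvPxor ys)
        = (List.range ys.length).map (pvPxor ys) ++ [pvPxor ys ys.length] := by
      rw [List.range_succ, List.map_append]; simp
    have hget : PySem.List.pyGetD ((List.range (ys.length + 1)).map (pvPxor ys)) (-1) 0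
        = pvPxor ys ys.length := by
      rw [hlast, PySem.List.pyGetD_neg_one_append_singleton]
    rw [hget]
    have hagree : ∀ m, m ≤ ys.length → pvPxor (ys ++ [x]) m = pvPxor ys m := by
      intro m hm
      unfold pvPxor
      rw [List.take_append_of_le_length hm]
    have hlen : (ys ++ [x]).length = ys.length + 1 := by simp
    have h1 : (List.range (ys.length + 1)).map (pvPxor (ys ++ [x]))
        = (List.range (ys.length + 1)).map (pvPxor ys) := by
      apply List.map_congr_left
      intro m hm
      exact hagree m (by simpa using Nat.lt_succ_iff.mp (List.mem_range.mp hm))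
    have hR : (List.range ((ys ++ [x]).length + 1)).map (pvPxor (ys ++ [x]))
        = (List.range (ys.length + 1)).map (pvPxor (ys ++ [x]))
          ++ [pvPxor (ys ++ [x]) (ys.length + 1)] := by
      rw [hlen, List.range_succ, List.map_append]
      rfl
    rw [hR, h1]
    congr 1
    have hx : pvPxor (ys ++ [x]) (ys.length + 1)
        = PySem.Int.bxor (pvPxor (ys ++ [x]) ys.length) (ys ++ [x])[ys.length] :=
      pvPxor_succ (ys ++ [x]) ys.length (by simp)
    rw [hx, hagree ys.length le_rfl]
    congr 1
    simp

theorem pv_firstloop (arr : List Int) (k : Int) (hk0 : 0 ≤ k) (hkn : k ≤ (arr.length : Int)) :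
    (PySem.List.pyRange 0 k).foldl
        (fun c i => PySem.Int.bxor c (PySem.List.pyGetD arr i 0)) 0
      = pvPxor arr k.toNat := by
  have hlen : ((arr.take k.toNat).length : Int) = k := by
    simp [List.length_take]; omega
  have hcongr : (PySem.List.pyRange 0 k).foldl
        (fun c i => PySem.Int.bxor c (PySem.List.pyGetD arr i 0)) 0
      = (PySem.List.pyRange 0 k).foldl
        (fun c i => PySem.Int.bxor c (PySem.List.pyGetD (arr.take k.toNat) i 0)) 0 := by
    apply PySem.List.foldl_congr_mem
    intro acc j hj
    obtain ⟨hj0, hjk⟩ := PySem.List.mem_pyRange_one.mp hj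
    rw [PySem.List.pyGetD_eq_getElem arr 0 hj0 (by omega),
        PySem.List.pyGetD_eq_getElem (arr.take k.toNat) 0 hj0 (by omega)]
    congr 1
    exact (List.getElem_take).symm
  rw [hcongr]
  have := PySem.List.foldl_pyRange_zero_pyGetD (arr.take k.toNat) 0 PySem.Int.bxor 0
  rw [show PySem.List.len (arr.take k.toNat) = k by rw [PySem.List.len_eq]; exact hlen] at this
  rw [this]
  rfl

theorem pv_step_w (arr : List Int) (k i : Int) (hk0 : 0 ≤ k) (hki : k ≤ i)
    (hin : i < (arr.length : Int)) :
    PySem.Int.bxor (PySem.Int.bxor (pvWnd arr k i) (PySem.List.pyGetD arr (i - k) 0))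
        (PySem.List.pyGetD arr i 0)
      = pvWnd arr k (i + 1) := by
  unfold pvWnd
  rw [PySem.List.pyGetD_eq_getElem arr 0 (by omega) hin,
      PySem.List.pyGetD_eq_getElem arr 0 (show (0:Int) ≤ i - k by omega) (by omega)]
  have h1 : (i + 1).toNat = i.toNat + 1 := by omega
  have h2 : (i + 1 - k).toNat = (i - k).toNat + 1 := by omega
  rw [h1, h2, pvPxor_succ arr i.toNat (by omega), pvPxor_succ arr (i - k).toNat (by omega)]
  exact pv_xor_shuffle _ _ _ _

theorem pv_wnd_k (arr : List Int) (k : Int) : pvWnd arr k k = pvPxor arr k.toNat := by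
  unfold pvWnd
  rw [show k - k = 0 by ring]
  simp [pvPxor, PySem.Int.bxor_zero]

theorem pv_slide (arr : List Int) (k : Int) (hk0 : 0 ≤ k) :
    ∀ (t : Nat), k + (t : Int) ≤ (arr.length : Int) →
    (PySem.List.pyRange k (k + (t : Int))).foldl
        (fun (p : Int × Int) i =>
          (PySem.Int.bxor (PySem.Int.bxor p.1 (PySem.List.pyGetD arr (i - k) 0))
              (PySem.List.pyGetD arr i 0),
           max p.2 (PySem.Int.bxor (PySem.Int.bxor p.1 (PySem.List.pyGetD arr (i - k) 0))
              (PySem.List.pyGetD arr i 0))))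
        (pvWnd arr k k, pvWnd arr k k)
      = (pvWnd arr k (k + (t : Int)),
         ((PySem.List.pyRange (k + 1) (k + (t : Int) + 1)).map (pvWnd arr k)).foldl
           max (pvWnd arr k k)) := by
  intro t
  induction t with
  | zero =>
    intro _
    simp [PySem.List.pyRange_one_eq_nil (le_refl k),
          PySem.List.pyRange_one_eq_nil (le_refl (k + 1))]
  | succ t ih =>
    intro hbound
    have hb : k + ((t : Int) + 1) ≤ (arr.length : Int) := by push_cast at hbound ⊢; omega
    have hle : k ≤ k + (t : Int) := by omega
    have e1 : k + ((t + 1 : Nat) : Int) = (k + (t : Int)) + 1 := by push_cast; ring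
    rw [e1, PySem.List.pyRange_one_succ_right hle, List.foldl_append]
    rw [ih (by omega)]
    simp only [List.foldl_cons, List.foldl_nil]
    have hstep := pv_step_w arr k (k + (t : Int)) hk0 hle (by omega)
    rw [hstep]
    have e2 : (k + (t : Int)) + 1 + 1 = ((k + (t : Int)) + 1) + 1 := by ring
    rw [e2, PySem.List.pyRange_one_succ_right (show k + 1 ≤ k + (t : Int) + 1 by omega),
        List.map_append, List.foldl_append]
    simp

theorem maxSubarrayXOR_eval (arr : List Int) (k : Int) (hk0 : 0 ≤ k)
    (hkn : k ≤ (arr.length : Int)) :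
    maxSubarrayXOR arr k
      = ((PySem.List.pyRange (k + 1) ((arr.length : Int) + 1)).map (pvWnd arr k)).foldl
          max (pvWnd arr k k) := by
  simp only [maxSubarrayXOR, PySem.List.len_eq]
  rw [pv_firstloop arr k hk0 hkn, ← pv_wnd_k arr k]
  have ht : k + ((arr.length - k.toNat : Nat) : Int) = (arr.length : Int) := by
    omega
  have := pv_slide arr k hk0 (arr.length - k.toNat) (by omega)
  rw [ht] at this
  exact congrArg Prod.snd this

theorem maxSubarrayXOR_alt_eval (arr : List Int) (k : Int) (hk0 : 0 ≤ k)
    (hkn : k ≤ (arr.length : Int)) :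
    maxSubarrayXOR_alt arr k
      = ((PySem.List.pyRange (k + 1) ((arr.length : Int) + 1)).map (pvWnd arr k)).foldl
          max (pvWnd arr k k) := by
  simp only [maxSubarrayXOR_alt, PySem.List.len_eq]
  rw [pv_prefix_build arr]
  have hmap : (PySem.List.pyRange k ((arr.length : Int) + 1)).map
        (fun j => PySem.Int.bxor
          (PySem.List.pyGetD ((List.range (arr.length + 1)).map (pvPxor arr)) j 0)
          (PySem.List.pyGetD ((List.range (arr.length + 1)).map (pvPxor arr)) (j - k) 0))
      = (PySem.List.pyRange k ((arr.length : Int) + 1)).map (pvWnd arr k) := by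
    apply List.map_congr_left
    intro j hj
    obtain ⟨hjk, hjn⟩ := PySem.List.mem_pyRange_one.mp hj
    have hlen : (((List.range (arr.length + 1)).map (pvPxor arr)).length : Int)
        = (arr.length : Int) + 1 := by simp
    rw [PySem.List.pyGetD_eq_getElem _ 0 (by omega) (by omega),
        PySem.List.pyGetD_eq_getElem _ 0 (show (0:Int) ≤ j - k by omega) (by omega)]
    simp only [List.getElem_map, List.getElem_range]
    rfl
  rw [hmap, PySem.List.pyRange_one_cons (show k < (arr.length : Int) + 1 by omega),
      List.map_cons, PySem.List.max?_id_cons]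
  rfl

-- ===== VERDICT (by name: the statement is the Claim_ definition above) =====
theorem maxSubarrayXOR_spec : Claim_equal_maxSubarrayXOR := by
  intro arr k _ hpre
  obtain ⟨hk0, hkn⟩ := hpre
  unfold Spec_maxSubarrayXOR
  rw [maxSubarrayXOR_eval arr k hk0 hkn, maxSubarrayXOR_alt_eval arr k hk0 hkn]
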